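-- pv_equiv track=rewrite | github.com/sebnson/ps | programmers/lv0/181854.py | solution
-- ===== SOURCE A (Python) =====
-- def solution(arr, n):
--     # 홀수길이 여부에 따라 처리
--     is_odd_length = len(arr) % 2 == 1
--     answer = []
--
--     # 배열을 순회하면서 처리
--     for i, value in enumerate(arr):
--         if i % 2 == 0:  # 짝수 인덱스일 경우
--             # 홀수 길이이면 n을 더하고, 짝수 길이면 그대로 둔다.
--             # value = array의 값, i=index
--             answer.append(value + n if is_odd_length else value)
--         else:  # 홀수 인덱스일 경우
--             # 짝수 길이이면 n을 더하고, 홀수 길이면 그대로 둔다.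
--             answer.append(value if is_odd_length else value + n)
--
--     return answer
-- ===== SOURCE B (Python) =====
-- def solution(arr, n):
--     # pick the per-position-in-pair deltas once from the length parity,
--     # then walk the list two elements at a time -- no index parity tests.
--     d0, d1 = (n, 0) if len(arr) % 2 == 1 else (0, n)
--     out = []
--     i = 0
--     m = len(arr)
--     while i + 1 < m:
--         out.append(arr[i] + d0)
--         out.append(arr[i + 1] + d1)
--         i += 2
--     if i < m:
--         out.append(arr[i] + d0)
--     return out
-- ===== Notes on version B (the rewrite author's own statement) =====
-- stated objective: alternative
-- what changed: B decides the two per-pair increments (d0,d1) once from the length parity and consumes the list two elements at a time, instead of A's per-element loop that tests the parity of every index.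
import Mathlib
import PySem

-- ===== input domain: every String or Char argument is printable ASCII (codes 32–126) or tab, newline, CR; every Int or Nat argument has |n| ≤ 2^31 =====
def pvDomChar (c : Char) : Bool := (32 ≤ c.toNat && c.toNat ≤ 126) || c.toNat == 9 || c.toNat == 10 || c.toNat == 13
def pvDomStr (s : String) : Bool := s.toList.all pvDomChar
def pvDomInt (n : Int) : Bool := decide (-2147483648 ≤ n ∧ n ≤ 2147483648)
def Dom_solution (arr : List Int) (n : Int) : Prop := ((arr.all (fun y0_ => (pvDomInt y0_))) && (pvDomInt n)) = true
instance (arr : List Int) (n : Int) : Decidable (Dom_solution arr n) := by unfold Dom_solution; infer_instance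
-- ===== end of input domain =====

-- B decides the two per-pair increments once from the length parity and walks the list
-- two elements at a time, instead of A's per-element loop testing each index's parity (alternative decomposition).


-- ===== PORT A =====
def solution (arr : List Int) (n : Int) : List Int :=
  let isOddLength := arr.length % 2 == 1
  (PySem.List.enumerate arr).foldl
    (fun answer iv =>
      if PySem.Int.mod iv.1 2 == 0 then
        answer ++ [if isOddLength then iv.2 + n else iv.2]
      else
        answer ++ [if isOddLength then iv.2 else iv.2 + n]) []

-- ===== PORT B =====
-- the pair-consuming while loop of Source B, as structural recursion two elements at a time
def solutionAltGo (d0 d1 : Int) : List Int → List Int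
  | [] => []
  | [x] => [x + d0]
  | x :: y :: rest => (x + d0) :: (y + d1) :: solutionAltGo d0 d1 rest

def solution_alt (arr : List Int) (n : Int) : List Int :=
  let p : Int × Int := if arr.length % 2 == 1 then (n, 0) else (0, n)
  solutionAltGo p.1 p.2 arr

-- ===== PRECONDITION & SPEC =====
def Spec_solution (arr : List Int) (n : Int) (out : List Int) : Prop := out = solution_alt arr n
instance (arr : List Int) (n : Int) (out : List Int) : Decidable (Spec_solution arr n out) := by unfold Spec_solution; infer_instance

-- ===== CLAIM (what is proved, stated in full; the proofs are below) =====
def Claim_equal_solution : Prop := ∀ (arr : List Int) (n : Int), Dom_solution arr n → Spec_solution arr n (solution arr n)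

-- ===== LEMMAS AND PROOFS =====

-- A's enumerate-fold, started at any even index k with accumulator ans, produces ans ++ B's pair walk.
theorem foldl_enum_eq_go (d0 d1 : Int) :
    ∀ (xs : List Int) (k : Int) (ans : List Int), k % 2 = 0 →
      (PySem.List.enumerate xs k).foldl
        (fun answer iv =>
          if PySem.Int.mod iv.1 2 == 0 then answer ++ [iv.2 + d0] else answer ++ [iv.2 + d1]) ans
      = ans ++ solutionAltGo d0 d1 xs := by
  intro xs
  induction xs using solutionAltGo.induct with
  | case1 =>
      intro k ans hk
      simp [PySem.List.enumerate, solutionAltGo]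
  | case2 x =>
      intro k ans hk
      have h0 : PySem.Int.mod k 2 = 0 := by
        rw [PySem.Int.mod_eq_emod_of_pos (show (0:Int) < 2 by norm_num)]; omega
      show List.foldl _ ans ((k, x) :: PySem.List.enumerate ([] : List Int) (k + 1)) = _
      simp only [List.foldl_cons, h0, beq_self_eq_true, if_true]
      simp [PySem.List.enumerate, solutionAltGo]
  | case3 x y rest ih =>
      intro k ans hk
      have h0 : PySem.Int.mod k 2 = 0 := by
        rw [PySem.Int.mod_eq_emod_of_pos (show (0:Int) < 2 by norm_num)]; omega
      have h1 : PySem.Int.mod (k + 1) 2 = 1 := by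
        rw [PySem.Int.mod_eq_emod_of_pos (show (0:Int) < 2 by norm_num)]; omega
      show List.foldl _ ans ((k, x) :: (k + 1, y) :: PySem.List.enumerate rest (k + 1 + 1)) = _
      simp only [List.foldl_cons, h0, h1, beq_self_eq_true, if_true,
        show ((1 : Int) == 0) = false from by decide, Bool.false_eq_true, if_false]
      rw [ih (k + 1 + 1) (ans ++ [x + d0] ++ [y + d1]) (by omega)]
      simp [solutionAltGo]

-- ===== VERDICT (by name: the statement is the Claim_ definition above) =====
theorem solution_spec : Claim_equal_solution := by
  unfold Claim_equal_solution
  intro arr n _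
  unfold Spec_solution solution solution_alt
  by_cases h : arr.length % 2 = 1
  · have hif : (arr.length % 2 == 1) = true := by simp [h]
    have key := foldl_enum_eq_go n 0 arr 0 [] (by norm_num)
    simp only [add_zero, List.nil_append] at key
    simp only [hif, if_true]
    exact key
  · have hif : (arr.length % 2 == 1) = false := by simp [h]
    have key := foldl_enum_eq_go 0 n arr 0 [] (by norm_num)
    simp only [add_zero, List.nil_append] at key
    simp only [hif, if_false, Bool.false_eq_true]
    exact key
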